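-- pv_equiv track=rewrite | github.com/8fdafs2/Codewars-Solu-Python | src/kyu6_Sum_Consecutives.py | sum_consecutives_02
-- ===== SOURCE A (Python) =====
-- def sum_consecutives_02(s):
--     ret = [s[0]]
--     for i in range(len(s) - 1):
--         if s[i] == s[i + 1]:
--             ret[-1] += s[i]
--         else:
--             ret.append(s[i + 1])
--     return ret
-- ===== SOURCE B (Python) =====
-- def sum_consecutives_02(s):
--     out = []
--     i = 0
--     while i < len(s):
--         j = i + 1
--         while j < len(s) and s[j] == s[i]:
--             j += 1
--         out.append(s[i] * (j - i))
--         i = j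
--     return out
-- ===== Notes on version B (the rewrite author's own statement) =====
-- stated objective: alternative
-- what changed: Replaces the running accumulator that mutates the last output entry on each equal adjacent pair with a two-pointer scan that finds each run's end and appends value*(run length) once per run.
import Mathlib
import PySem

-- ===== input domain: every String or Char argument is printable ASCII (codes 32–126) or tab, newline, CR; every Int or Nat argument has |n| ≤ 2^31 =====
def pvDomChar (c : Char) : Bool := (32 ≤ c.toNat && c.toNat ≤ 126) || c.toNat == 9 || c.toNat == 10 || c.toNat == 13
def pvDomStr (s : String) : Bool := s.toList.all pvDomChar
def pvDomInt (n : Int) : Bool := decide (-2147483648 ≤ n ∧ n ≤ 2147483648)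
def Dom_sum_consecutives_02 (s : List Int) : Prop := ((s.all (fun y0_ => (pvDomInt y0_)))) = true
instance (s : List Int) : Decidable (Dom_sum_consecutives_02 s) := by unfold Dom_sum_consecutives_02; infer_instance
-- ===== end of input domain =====

-- B sums each run of consecutive equal elements by a two-pointer scan (appending value * run
-- length once per run) instead of A's per-element accumulator mutating the last output entry; on the empty list A raises
-- IndexError while B returns [] (see Raises_ below).

-- ===== PORT A =====
-- loop body: 'if s[i] == s[i+1]: ret[-1] += s[i] else: ret.append(s[i+1])'
-- (pyGetD with default 0 is exact: under Pre_ (s ≠ []) every index i, i+1 drawn from the range is in bounds)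
def pyStepA (s : List Int) (ret : List Int) (i : Int) : List Int :=
  if PySem.List.pyGetD s i 0 = PySem.List.pyGetD s (i + 1) 0 then
    ret.dropLast ++ [PySem.List.pyGetD ret (-1) 0 + PySem.List.pyGetD s i 0]
  else
    ret ++ [PySem.List.pyGetD s (i + 1) 0]

def sum_consecutives_02 (s : List Int) : List Int :=
  (PySem.List.pyRange 0 ((s.length : Int) - 1) 1).foldl (pyStepA s) [PySem.List.pyGetD s 0 0]

-- ===== PORT B =====
-- inner loop: 'j = i + 1; while j < len(s) and s[j] == s[i]: j += 1'  (v = s[i])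
def altRunEnd (s : List Int) (v : Int) (j : Int) : Int :=
  if _h : j < (s.length : Int) ∧ PySem.List.pyGetD s j 0 = v then altRunEnd s v (j + 1) else j
termination_by ((s.length : Int) - j).toNat
decreasing_by omega

-- termination helper for the outer loop: the inner loop never moves j backwards
theorem le_altRunEnd (s : List Int) (v : Int) (j : Int) : j ≤ altRunEnd s v j := by
  fun_induction altRunEnd s v j with
  | case1 j h ih => omega
  | case2 j h => omega

-- outer loop: 'while i < len(s): … out.append(s[i] * (j - i)); i = j'
def altLoop (s : List Int) (out : List Int) (i : Int) : List Int :=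
  if _h : i < (s.length : Int) then
    let j := altRunEnd s (PySem.List.pyGetD s i 0) (i + 1)
    altLoop s (out ++ [PySem.List.pyGetD s i 0 * (j - i)]) j
  else out
termination_by ((s.length : Int) - i).toNat
decreasing_by have := le_altRunEnd s (PySem.List.pyGetD s i 0) (i + 1); omega

def sum_consecutives_02_alt (s : List Int) : List Int := altLoop s [] 0

-- ===== PRECONDITION & SPEC =====
-- A unconditionally reads the first element, so it raises IndexError exactly on the empty list (where B returns []).
def Pre_sum_consecutives_02 (s : List Int) : Prop := s ≠ []
instance (s : List Int) : Decidable (Pre_sum_consecutives_02 s) := by unfold Pre_sum_consecutives_02; infer_instance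
def pvWitness_sum_consecutives_02 : List Int := [1, 1, 2]

def Spec_sum_consecutives_02 (s : List Int) (out : List Int) : Prop := out = sum_consecutives_02_alt s
instance (s : List Int) (out : List Int) : Decidable (Spec_sum_consecutives_02 s out) := by unfold Spec_sum_consecutives_02; infer_instance

-- ===== CLAIM (what is proved, stated in full; the proofs are below) =====
def Claim_equal_sum_consecutives_02 : Prop := ∀ (s : List Int), Dom_sum_consecutives_02 s → Pre_sum_consecutives_02 s → Spec_sum_consecutives_02 s (sum_consecutives_02 s)

-- ===== LEMMAS AND PROOFS =====

-- A's loop body, reading the adjacent pair (s[i], s[i+1]) directly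
def step2 (ret : List Int) (p : Int × Int) : List Int :=
  if p.1 = p.2 then ret.dropLast ++ [PySem.List.pyGetD ret (-1) 0 + p.1] else ret ++ [p.2]

-- reference in A's shape: acc = sum of the current run so far, cur = its value
def refA (cur acc : Int) : List Int → List Int
  | [] => [acc]
  | y :: t => if cur = y then refA y (acc + cur) t else acc :: refA y y t

-- reference in B's shape: value * run length, then recurse past the run
def refRuns : List Int → List Int
  | [] => []
  | x :: t =>
    (x * (1 + ((t.takeWhile (· = x)).length : Int))) :: refRuns (t.drop (t.takeWhile (· = x)).length)
termination_by l => l.length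
decreasing_by simp [List.length_drop]

theorem drop_head (s : List Int) (j : Int) (a : Int) (u : List Int) (h0 : 0 ≤ j)
    (h : s.drop j.toNat = a :: u) : j < (s.length : Int) ∧ PySem.List.pyGetD s j 0 = a := by
  have hlen : j.toNat < s.length := by
    have := congrArg List.length h
    simp [List.length_drop] at this
    omega
  have hget : s[j.toNat] = a := by
    have h0' : (s.drop j.toNat)[0]'(by simp [h]) = a := by simp [h]
    simpa using h0'
  refine ⟨by omega, ?_⟩
  rw [PySem.List.pyGetD_eq_getElem s 0 h0 (by omega)]
  exact hget

theorem runEnd_spec (u : List Int) : ∀ (s : List Int) (v : Int) (j : Int), 0 ≤ j →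
    s.drop j.toNat = u → altRunEnd s v j = j + ((u.takeWhile (· = v)).length : Int) := by
  induction u with
  | nil =>
    intro s v j h0 hd
    rw [altRunEnd]
    have : ¬ j < (s.length : Int) := by
      have := congrArg List.length hd
      simp [List.length_drop] at this
      omega
    simp [this]
  | cons a u' ih =>
    intro s v j h0 hd
    obtain ⟨hlt, hg⟩ := drop_head s j a u' h0 hd
    have hd' : s.drop (j + 1).toNat = u' := by
      have h1 : (j + 1).toNat = j.toNat + 1 := by omega
      rw [h1, ← List.drop_drop (i := 1) (j := j.toNat), hd]
      rfl
    rw [altRunEnd]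
    by_cases hv : a = v
    · simp only [hlt, hg, hv, and_self, dite_true]
      rw [ih s v (j + 1) (by omega) hd']
      simp
      ring
    · have : ¬ ((j : Int) < (s.length : Int) ∧ PySem.List.pyGetD s j 0 = v) := by
        intro hc; exact hv (by rw [← hg, hc.2])
      simp [this, hv]

theorem loop_spec (n : Nat) : ∀ (u : List Int), u.length ≤ n → ∀ (s : List Int) (out : List Int) (i : Int), 0 ≤ i →
    s.drop i.toNat = u → altLoop s out i = out ++ refRuns u := by
  induction n with
  | zero =>
    intro u hu s out i h0 hd
    have : u = [] := by cases u <;> simp_all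
    subst this
    rw [altLoop]
    have : ¬ i < (s.length : Int) := by
      have := congrArg List.length hd
      simp [List.length_drop] at this
      omega
    simp [this, refRuns]
  | succ n ih =>
    intro u hu s out i h0 hd
    cases u with
    | nil =>
      rw [altLoop]
      have : ¬ i < (s.length : Int) := by
        have := congrArg List.length hd
        simp [List.length_drop] at this
        omega
      simp [this, refRuns]
    | cons x u' =>
      obtain ⟨hlt, hg⟩ := drop_head s i x u' h0 hd
      have hd' : s.drop (i + 1).toNat = u' := by
        have h1 : (i + 1).toNat = i.toNat + 1 := by omega
        rw [h1, ← List.drop_drop (i := 1) (j := i.toNat), hd]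
        rfl
      have hre : altRunEnd s x (i + 1) = (i + 1) + ((u'.takeWhile (· = x)).length : Int) :=
        runEnd_spec u' s x (i + 1) (by omega) hd'
      set k := (u'.takeWhile (· = x)).length with hk
      rw [altLoop]
      simp only [hlt, dite_true, hg, hre]
      rw [ih (u'.drop k) (by
            have h2 : (u'.takeWhile (· = x)).length ≤ u'.length := (List.takeWhile_sublist _).length_le
            have h3 : u'.length + 1 ≤ n + 1 := by simpa using hu
            simp [List.length_drop]; omega)
          s _ (i + 1 + (k : Int)) (by omega) (by
            have h1 : (i + 1 + (k : Int)).toNat = i.toNat + 1 + k := by omega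
            rw [h1, ← List.drop_drop (i := k) (j := i.toNat + 1), ← List.drop_drop (i := 1) (j := i.toNat), hd]
            rfl)]
      rw [show refRuns (x :: u') = (x * (1 + (k : Int))) :: refRuns (u'.drop k) by rw [refRuns]]
      simp only [List.append_assoc, List.singleton_append]
      congr 2
      ring

theorem refRuns_eq_refA (n : Nat) : ∀ (t : List Int), t.length ≤ n → ∀ (x acc : Int),
    refA x acc t = (acc + x * ((t.takeWhile (· = x)).length : Int)) :: refRuns (t.drop (t.takeWhile (· = x)).length) := by
  induction n with
  | zero =>
    intro t ht x acc
    have : t = [] := by cases t <;> simp_all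
    subst this
    simp [refA, refRuns]
  | succ n ih =>
    intro t ht x acc
    cases t with
    | nil => simp [refA, refRuns]
    | cons y t' =>
      by_cases hc : x = y
      · subst hc
        rw [show refA x acc (x :: t') = refA x (acc + x) t' by simp [refA]]
        rw [ih t' (by simpa using ht) x (acc + x)]
        simp only [List.takeWhile_cons, decide_true]
        simp [List.length_cons]
        ring
      · rw [show refA x acc (y :: t') = acc :: refA y y t' by simp only [refA, if_neg hc]]
        have h1 : (y :: t').takeWhile (· = x) = [] := by simp [List.takeWhile_cons]; omega
        rw [h1]
        simp only [List.length_nil, Nat.cast_zero, mul_zero, add_zero, List.drop_zero]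
        congr 1
        rw [ih t' (by simpa using ht) y y]
        rw [show refRuns (y :: t') = (y * (1 + ((t'.takeWhile (· = y)).length : Int))) :: refRuns (t'.drop (t'.takeWhile (· = y)).length) by rw [refRuns]]
        congr 1
        ring

theorem fold2 (t : List Int) : ∀ (cur : Int) (pre : List Int) (acc : Int),
    (((cur :: t).zip t).foldl step2 (pre ++ [acc])) = pre ++ refA cur acc t := by
  induction t with
  | nil => intro cur pre acc; simp [refA]
  | cons y t' ih =>
    intro cur pre acc
    simp only [List.zip_cons_cons, List.foldl_cons, refA]
    by_cases hc : cur = y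
    · subst hc
      rw [show step2 (pre ++ [acc]) (cur, cur) = pre ++ [acc + cur] by
        simp [step2, PySem.List.pyGetD_neg_one_append_singleton, add_comm]]
      rw [if_pos rfl]
      exact ih cur pre (acc + cur)
    · rw [show step2 (pre ++ [acc]) (cur, y) = (pre ++ [acc]) ++ [y] by simp [step2, hc]]
      simp only [hc, if_false]
      rw [ih y (pre ++ [acc]) y, List.append_assoc]
      simp

theorem A_port_eq (x : Int) (t : List Int) :
    (PySem.List.pyRange 0 (((x :: t).length : Int) - 1) 1).foldl (pyStepA (x :: t)) [PySem.List.pyGetD (x :: t) 0 0]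
      = refA x x t := by
  have hb : (((x :: t).length : Int) - 1) = (((x :: t).zip t).length : Int) := by
    simp [List.length_zip]
  rw [hb, PySem.List.pyGetD_zero_cons]
  rw [PySem.List.foldl_congr_mem _ (pyStepA (x :: t))
        (fun acc j => step2 acc (PySem.List.pyGetD ((x :: t).zip t) j (0, 0))) [x] ?_]
  · rw [PySem.List.foldl_pyRange_zero_pyGetD' ((x :: t).zip t) (0, 0) step2 [x]]
    exact fold2 t x [] x
  · intro acc j hj
    rw [PySem.List.mem_pyRange_one] at hj
    obtain ⟨h0, h1⟩ := hj
    have hk : j.toNat < ((x :: t).zip t).length := by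
      simp [List.length_zip] at h1 ⊢; omega
    have hkt : j.toNat < t.length := by simp [List.length_zip] at hk; omega
    have e1 : PySem.List.pyGetD (x :: t) j 0 = (x :: t)[j.toNat]'(by simp; omega) :=
      PySem.List.pyGetD_eq_getElem _ 0 h0 (by simp; omega)
    have e2 : PySem.List.pyGetD (x :: t) (j + 1) 0 = (x :: t)[j.toNat + 1]'(by simp; omega) := by
      rw [PySem.List.pyGetD_eq_getElem _ 0 (by omega) (by simp; omega)]
      congr 1
      omega
    have e3 : PySem.List.pyGetD ((x :: t).zip t) j (0, 0) = ((x :: t)[j.toNat]'(by simp; omega), t[j.toNat]) := by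
      rw [PySem.List.pyGetD_eq_getElem _ (0, 0) h0 (by omega)]
      exact List.getElem_zip
    have e4 : (x :: t)[j.toNat + 1]'(by simp; omega) = t[j.toNat] := List.getElem_cons_succ ..
    simp only [pyStepA, step2, e1, e2, e3, e4]

-- ===== VERDICT (by name: the statement is the Claim_ definition above) =====
theorem sum_consecutives_02_spec : Claim_equal_sum_consecutives_02 := by
  intro s _ hpre
  unfold Spec_sum_consecutives_02 sum_consecutives_02 sum_consecutives_02_alt
  obtain ⟨x, t, rfl⟩ : ∃ x t, s = x :: t := by
    cases s with
    | nil => exact absurd rfl hpre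
    | cons a b => exact ⟨a, b, rfl⟩
  rw [A_port_eq, loop_spec (x :: t).length (x :: t) le_rfl (x :: t) [] 0 le_rfl (by simp)]
  rw [refRuns_eq_refA t.length t le_rfl x x]
  rw [show refRuns (x :: t) = (x * (1 + ((t.takeWhile (· = x)).length : Int))) :: refRuns (t.drop (t.takeWhile (· = x)).length) by rw [refRuns]]
  simp only [List.nil_append]
  congr 1
  ring
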